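-- pv_equiv track=rewrite | github.com/soulomoon/leetcode | 907SumofSubarrayMinimums/Solution.py | get_count_both
-- ===== SOURCE A (Python) =====
-- def get_count_both(A, r=True):
--     stack = []
--     res = [0 for _ in A]
--     cpm = (lambda a, b: a < b) if r else (lambda a, b: a <= b)
--
--     def feed(right_end):
--         old_idx = stack.pop()
--         left = old_idx - (stack[-1] if stack else -1)
--         right = right_end - old_idx
--         res[old_idx] = right * left
--
--     for idx, e in enumerate(A):
--         while stack and cpm(e, A[stack[-1]]):
--             feed(idx)
--         stack.append(idx)
--     while stack:
--         feed(len(A))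
--     return res
-- ===== SOURCE B (Python) =====
-- def get_count_both(A, r=True):
--     n = len(A)
--     res = []
--     for i in range(n):
--         right = i + 1
--         while right < n and (A[right] >= A[i] if r else A[right] > A[i]):
--             right += 1
--         left = i - 1
--         while left >= 0 and (A[left] > A[i] if r else A[left] >= A[i]):
--             left -= 1
--         res.append((right - i) * (i - left))
--     return res
-- ===== Notes on version B (the rewrite author's own statement) =====
-- stated objective: simpler
-- what changed: Replaces A's single-pass monotonic stack with pop-time result writing by a direct per-index computation: for each i, scan right for the next strictly-smaller (r=True) / smaller-or-equal (r=False) element and left for the previous smaller-or-equal (r=True) / strictly-smaller (r=False) element, and emit (right-i)*(i-left).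
import Mathlib
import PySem

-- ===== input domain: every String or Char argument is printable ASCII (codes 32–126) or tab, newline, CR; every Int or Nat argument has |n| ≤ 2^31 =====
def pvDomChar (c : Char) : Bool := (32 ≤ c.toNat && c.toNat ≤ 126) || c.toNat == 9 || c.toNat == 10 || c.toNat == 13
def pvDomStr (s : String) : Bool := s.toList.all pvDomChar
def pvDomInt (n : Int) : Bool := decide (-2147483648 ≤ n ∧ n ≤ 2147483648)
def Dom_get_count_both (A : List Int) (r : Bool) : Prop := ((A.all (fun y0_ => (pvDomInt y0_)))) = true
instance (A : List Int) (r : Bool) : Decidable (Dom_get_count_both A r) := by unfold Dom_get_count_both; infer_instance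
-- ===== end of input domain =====

-- B replaces A's monotonic stack (results written at pop time) by independent per-index
-- left/right boundary scans; objective: simpler (not faster).

-- ===== PORT A =====
-- cpm = (lambda a, b: a < b) if r else (lambda a, b: a <= b)
def cpmP (r : Bool) (a b : Int) : Bool := if r then a < b else a ≤ b

-- def feed(right_end): old_idx = stack.pop(); left = old_idx - (stack[-1] if stack else -1);
--   right = right_end - old_idx; res[old_idx] = right * left
-- (stack is kept top-first; the [] case is unreachable: Python calls feed only with a nonempty stack)
-- stack[-1] if stack else -1
def belowOf : List Nat → Int
  | [] => -1
  | b :: _ => (b : Int)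

def feedP (right_end : Nat) (st : List Nat) (res : List Int) : List Nat × List Int :=
  match st with
  | [] => ([], res)
  | old :: rest =>
      (rest, res.set old (((right_end : Int) - (old : Int)) * ((old : Int) - belowOf rest)))

-- while stack and cpm(e, A[stack[-1]]): feed(idx)      (e = A[idx])
def popLoopP (A : List Int) (r : Bool) (idx : Nat) : List Nat → List Int → List Nat × List Int
  | [], res => ([], res)
  | top :: rest, res =>
      if cpmP r (A.getD idx 0) (A.getD top 0) then
        let p := feedP idx (top :: rest) res
        popLoopP A r idx p.1 p.2
      else (top :: rest, res)
  termination_by st _ => st.length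
  decreasing_by simp [feedP]

-- while stack: feed(len(A))
def drainP (A : List Int) : List Nat → List Int → List Int
  | [], res => res
  | top :: rest, res =>
      let p := feedP A.length (top :: rest) res
      drainP A p.1 p.2
  termination_by st _ => st.length
  decreasing_by simp [feedP]

def get_count_both (A : List Int) (r : Bool) : List Int :=
  let res0 : List Int := A.map (fun _ => 0)
  let p := (List.range A.length).foldl
    (fun (sr : List Nat × List Int) (idx : Nat) =>
      let q := popLoopP A r idx sr.1 sr.2
      (idx :: q.1, q.2)) ([], res0)
  drainP A p.1 p.2

-- ===== PORT B =====
-- right = i+1; while right < n and (A[right] >= A[i] if r else A[right] > A[i]): right += 1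
def rightScanB (A : List Int) (r : Bool) (vi : Int) (j : Nat) : Nat :=
  if h : j < A.length then
    (if (if r then decide (vi ≤ A.getD j 0) else decide (vi < A.getD j 0)) then rightScanB A r vi (j + 1) else j)
  else j
  termination_by A.length - j
  decreasing_by omega

-- left = i-1; while left >= 0 and (A[left] > A[i] if r else A[left] >= A[i]): left -= 1
-- (argument j is the current candidate index plus one; result is the Python value of `left`)
def leftScanB (A : List Int) (r : Bool) (vi : Int) : Nat → Int
  | 0 => -1
  | k + 1 => if (if r then decide (vi < A.getD k 0) else decide (vi ≤ A.getD k 0)) then leftScanB A r vi k else (k : Int)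

def get_count_both_alt (A : List Int) (r : Bool) : List Int :=
  (List.range A.length).map (fun i =>
    ((rightScanB A r (A.getD i 0) (i + 1) : Int) - (i : Int)) *
      ((i : Int) - leftScanB A r (A.getD i 0) i))

-- ===== PRECONDITION & SPEC =====
def Spec_get_count_both (A : List Int) (r : Bool) (out : List Int) : Prop := out = get_count_both_alt A r
instance (A : List Int) (r : Bool) (out : List Int) : Decidable (Spec_get_count_both A r out) := by unfold Spec_get_count_both; infer_instance

-- ===== CLAIM (what is proved, stated in full; the proofs are below) =====
def Claim_equal_get_count_both : Prop := ∀ (A : List Int) (r : Bool), Dom_get_count_both A r → Spec_get_count_both A r (get_count_both A r)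

-- ===== LEMMAS AND PROOFS =====

-- "index k pops index t": cpm(A[k], A[t])
def beats (A : List Int) (r : Bool) (k t : Nat) : Bool := cpmP r (A.getD k 0) (A.getD t 0)

-- t is still on the stack after indices < m have been processed
def aliveAt (A : List Int) (r : Bool) (m t : Nat) : Prop :=
  ∀ k, t < k → k < m → beats A r k t = false

-- the value B emits at index i
def outVal (A : List Int) (r : Bool) (i : Nat) : Int :=
  ((rightScanB A r (A.getD i 0) (i + 1) : Int) - (i : Int)) *
    ((i : Int) - leftScanB A r (A.getD i 0) i)

theorem beats_trans (A : List Int) (r : Bool) {k t j : Nat}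
    (h1 : beats A r k t = false) (h2 : beats A r t j = false) : beats A r k j = false := by
  simp [beats, cpmP] at *
  cases r <;> simp_all <;> omega

theorem beats_trans2 (A : List Int) (r : Bool) {t k j : Nat}
    (h1 : beats A r t k = true) (h2 : beats A r t j = false) : beats A r k j = false := by
  simp [beats, cpmP] at *
  cases r <;> simp_all <;> omega

theorem rightCond_eq (A : List Int) (r : Bool) (t j : Nat) :
    (if r then decide (A.getD t 0 ≤ A.getD j 0) else decide (A.getD t 0 < A.getD j 0)) = ! beats A r j t := by
  cases r <;> simp [beats, cpmP, ← decide_not]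

theorem leftCond_eq (A : List Int) (r : Bool) (t k : Nat) :
    (if r then decide (A.getD t 0 < A.getD k 0) else decide (A.getD t 0 ≤ A.getD k 0)) = beats A r t k := by
  cases r <;> simp [beats, cpmP]

theorem rightScan_stop_aux (A : List Int) (r : Bool) (t : Nat) :
    ∀ d j m, m - j ≤ d → j ≤ m → (∀ k, j ≤ k → k < m → beats A r k t = false) →
      (m < A.length → beats A r m t = true) → m ≤ A.length →
      rightScanB A r (A.getD t 0) j = m := by
  intro d
  induction d with
  | zero =>
    intro j m hd hjm _ hbeat _
    have hjm' : j = m := by omega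
    subst hjm'
    rw [rightScanB]
    split
    · next h => rw [rightCond_eq A r t j, hbeat h]; simp
    · rfl
  | succ d ih =>
    intro j m hd hjm hall hbeat hmn
    by_cases hjm' : j = m
    · subst hjm'
      rw [rightScanB]
      split
      · next h => rw [rightCond_eq A r t j, hbeat h]; simp
      · rfl
    · have h : j < A.length := by omega
      rw [rightScanB, dif_pos h, rightCond_eq A r t j, hall j le_rfl (by omega)]
      simp only [Bool.not_false, if_true]
      exact ih (j+1) m (by omega) (by omega) (fun k hk1 hk2 => hall k (by omega) hk2) hbeat hmn

theorem rightScan_stop (A : List Int) (r : Bool) (t : Nat) :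
    ∀ j m, j ≤ m → (∀ k, j ≤ k → k < m → beats A r k t = false) →
      (m < A.length → beats A r m t = true) → m ≤ A.length →
      rightScanB A r (A.getD t 0) j = m := fun j m =>
  rightScan_stop_aux A r t (m - j) j m le_rfl

theorem leftScan_spec (A : List Int) (r : Bool) (t : Nat) : ∀ j,
    (leftScanB A r (A.getD t 0) j = -1 ∧ ∀ k, k < j → beats A r t k = true) ∨
    (∃ k0 : Nat, leftScanB A r (A.getD t 0) j = (k0 : Int) ∧ k0 < j ∧ beats A r t k0 = false ∧
      ∀ k, k0 < k → k < j → beats A r t k = true) := by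
  intro j
  induction j with
  | zero => exact Or.inl ⟨rfl, fun k hk => absurd hk (by omega)⟩
  | succ k ih =>
    rw [leftScanB, leftCond_eq A r t k]
    by_cases hb : beats A r t k = true
    · rw [hb]
      simp only [if_true]
      rcases ih with ⟨hw, hall⟩ | ⟨k0, hw, hk0, hbk0, hmax⟩
      · refine Or.inl ⟨hw, fun k' hk' => ?_⟩
        by_cases hkk : k' = k
        · subst hkk; exact hb
        · exact hall k' (by omega)
      · refine Or.inr ⟨k0, hw, by omega, hbk0, fun k' h1 h2 => ?_⟩
        by_cases hkk : k' = k
        · subst hkk; exact hb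
        · exact hmax k' h1 (by omega)
    · rw [Bool.not_eq_true] at hb
      rw [hb]
      simp only [Bool.false_eq_true, if_false]
      exact Or.inr ⟨k, rfl, by omega, hb, fun k' h1 h2 => absurd h1 (by omega)⟩

-- the crux: for a stack element t, the element below it is exactly B's left boundary
theorem below_eq_left (A : List Int) (r : Bool) (m t : Nat) (rest : List Nat)
    (hpw : (t :: rest).Pairwise (· > ·))
    (hsound : ∀ j ∈ t :: rest, j < m ∧ aliveAt A r m j)
    (hclosed : ∀ j ∈ t :: rest, ∀ k, k < j → aliveAt A r m k → k ∈ t :: rest) :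
    belowOf rest = leftScanB A r (A.getD t 0) t := by
  have htmem : t ∈ t :: rest := List.mem_cons_self ..
  obtain ⟨htm, hta⟩ := hsound t htmem
  rcases leftScan_spec A r t t with ⟨hw, hall⟩ | ⟨k0, hw, hk0t, hbk0, hmax⟩
  · cases rest with
    | nil => rw [hw]; rfl
    | cons b rb =>
      exfalso
      have hbmem : b ∈ t :: b :: rb := by simp
      have hbt : t > b := (List.pairwise_cons.mp hpw).1 b (by simp)
      have hbb : beats A r t b = false := (hsound b hbmem).2 t hbt htm
      rw [hall b hbt] at hbb
      exact Bool.true_eq_false.mp hbb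
  · have hk0alive : aliveAt A r m k0 := by
      intro k hk1 hk2
      rcases lt_trichotomy k t with hkt | hkt | hkt
      · exact beats_trans2 A r (hmax k hk1 hkt) hbk0
      · subst hkt; exact hbk0
      · exact beats_trans A r (hta k hkt hk2) hbk0
    have hk0mem : k0 ∈ t :: rest := hclosed t htmem k0 hk0t hk0alive
    cases rest with
    | nil =>
      exfalso
      rcases List.mem_singleton.mp hk0mem with h
      omega
    | cons b rb =>
      have hbmem : b ∈ t :: b :: rb := by simp
      have hbt : t > b := (List.pairwise_cons.mp hpw).1 b (by simp)
      have hbb : beats A r t b = false := (hsound b hbmem).2 t hbt htm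
      have hble : b ≤ k0 := by
        by_contra hc
        rw [hmax b (by omega) hbt] at hbb
        exact Bool.true_eq_false.mp hbb
      have hk0le : k0 ≤ b := by
        rcases List.mem_cons.mp hk0mem with h | h
        · omega
        · rcases List.mem_cons.mp h with h' | h'
          · omega
          · have hgt : b > k0 :=
              (List.pairwise_cons.mp (List.pairwise_cons.mp hpw).2).1 k0 h'
            omega
      rw [hw]
      show (b : Int) = (k0 : Int)
      have : b = k0 := by omega
      rw [this]

def InvRes (A : List Int) (r : Bool) (m : Nat) (st : List Nat) (res : List Int) : Prop :=
  ∀ i, i < m → i ∉ st → ¬ aliveAt A r (m + 1) i → res.getD i 0 = outVal A r i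

theorem popLoop_ok (A : List Int) (r : Bool) (m : Nat) (hm : m < A.length) :
    ∀ st res, st.Pairwise (· > ·) →
      (∀ j ∈ st, j < m ∧ aliveAt A r m j) →
      (∀ j ∈ st, ∀ k, k < j → aliveAt A r m k → k ∈ st) →
      res.length = A.length →
      InvRes A r m st res →
      (popLoopP A r m st res).1.Pairwise (· > ·) ∧
      (∀ j ∈ (popLoopP A r m st res).1, j < m ∧ aliveAt A r m j ∧ beats A r m j = false) ∧
      (∀ j ∈ st, beats A r m j = false → j ∈ (popLoopP A r m st res).1) ∧
      (∀ j ∈ (popLoopP A r m st res).1, j ∈ st) ∧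
      (popLoopP A r m st res).2.length = A.length ∧
      InvRes A r m (popLoopP A r m st res).1 (popLoopP A r m st res).2 := by
  intro st
  induction st with
  | nil =>
    intro res hpw hsound hclosed hlen hres
    rw [popLoopP]
    exact ⟨List.Pairwise.nil, by simp, by simp, by simp, hlen, hres⟩
  | cons t rest ih =>
    intro res hpw hsound hclosed hlen hres
    have hbeq : cpmP r (A.getD m 0) (A.getD t 0) = beats A r m t := rfl
    obtain ⟨htm, hta⟩ := hsound t (List.mem_cons_self ..)
    by_cases hb : beats A r m t = true
    · -- pop t
      have hstep : popLoopP A r m (t :: rest) res =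
          popLoopP A r m rest (res.set t
            (((m : Int) - (t : Int)) * ((t : Int) - belowOf rest))) := by
        rw [popLoopP, hbeq, hb]
        rfl
      rw [hstep]
      set val := ((m : Int) - (t : Int)) * ((t : Int) - belowOf rest) with hval
      have hvo : val = outVal A r t := by
        have hr : rightScanB A r (A.getD t 0) (t + 1) = m :=
          rightScan_stop A r t (t + 1) m (by omega)
            (fun k hk1 hk2 => hta k (by omega) hk2) (fun _ => hb) (by omega)
        have hl := below_eq_left A r m t rest hpw hsound hclosed
        rw [hval, outVal, hr, ← hl]
      have hpw' : rest.Pairwise (· > ·) := (List.pairwise_cons.mp hpw).2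
      have hsound' : ∀ j ∈ rest, j < m ∧ aliveAt A r m j :=
        fun j hj => hsound j (List.mem_cons_of_mem _ hj)
      have hclosed' : ∀ j ∈ rest, ∀ k, k < j → aliveAt A r m k → k ∈ rest := by
        intro j hj k hk hal
        have hjt : t > j := (List.pairwise_cons.mp hpw).1 j hj
        have := hclosed j (List.mem_cons_of_mem _ hj) k hk hal
        rcases List.mem_cons.mp this with h | h
        · omega
        · exact h
      have hlen' : (res.set t val).length = A.length := by
        rw [List.length_set]; exact hlen
      have hres' : InvRes A r m rest (res.set t val) := by
        intro i him hinot hnal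
        by_cases hit : i = t
        · subst hit
          rw [List.getD_eq_getElem?_getD, List.getElem?_set_self (by omega), hvo]
          rfl
        · rw [List.getD_eq_getElem?_getD, List.getElem?_set_ne (fun h => hit h.symm),
            ← List.getD_eq_getElem?_getD]
          exact hres i him (by simp [hit, hinot]) hnal
      obtain ⟨c1, c2, c3, c4, c5, c6⟩ := ih (res.set t val) hpw' hsound' hclosed' hlen' hres'
      refine ⟨c1, c2, ?_, ?_, c5, c6⟩
      · intro j hj hjb
        rcases List.mem_cons.mp hj with h | h
        · subst h; rw [hb] at hjb; exact absurd hjb (by simp)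
        · exact c3 j h hjb
      · exact fun j hj => List.mem_cons_of_mem _ (c4 j hj)
    · -- stop
      rw [Bool.not_eq_true] at hb
      have hstep : popLoopP A r m (t :: rest) res = (t :: rest, res) := by
        rw [popLoopP, hbeq, hb]
        simp
      rw [hstep]
      have hallfalse : ∀ j ∈ t :: rest, beats A r m j = false := by
        intro j hj
        rcases List.mem_cons.mp hj with h | h
        · subst h; exact hb
        · have hjt : t > j := (List.pairwise_cons.mp hpw).1 j h
          have hjal : aliveAt A r m j := (hsound j hj).2
          exact beats_trans A r hb (hjal t hjt htm)
      exact ⟨hpw,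
        fun j hj => ⟨(hsound j hj).1, (hsound j hj).2, hallfalse j hj⟩,
        fun j hj _ => hj, fun j hj => hj, hlen, hres⟩

theorem drain_ok (A : List Int) (r : Bool) :
    ∀ st res, st.Pairwise (· > ·) →
      (∀ j ∈ st, j < A.length ∧ aliveAt A r A.length j) →
      (∀ j ∈ st, ∀ k, k < j → aliveAt A r A.length k → k ∈ st) →
      res.length = A.length →
      (∀ i, i < A.length → i ∉ st → res.getD i 0 = outVal A r i) →
      (drainP A st res).length = A.length ∧
      ∀ i, i < A.length → (drainP A st res).getD i 0 = outVal A r i := by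
  intro st
  induction st with
  | nil =>
    intro res _ _ _ hlen hres
    rw [drainP]
    exact ⟨hlen, fun i hi => hres i hi (by simp)⟩
  | cons t rest ih =>
    intro res hpw hsound hclosed hlen hres
    obtain ⟨htm, hta⟩ := hsound t (List.mem_cons_self ..)
    have hstep : drainP A (t :: rest) res =
        drainP A rest (res.set t
          (((A.length : Int) - (t : Int)) * ((t : Int) - belowOf rest))) := by
      rw [drainP]
      rfl
    rw [hstep]
    set val := ((A.length : Int) - (t : Int)) * ((t : Int) - belowOf rest) with hval
    have hvo : val = outVal A r t := by
      have hr : rightScanB A r (A.getD t 0) (t + 1) = A.length :=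
        rightScan_stop A r t (t + 1) A.length (by omega)
          (fun k hk1 hk2 => hta k (by omega) hk2) (fun h => absurd h (by omega)) le_rfl
      have hl := below_eq_left A r A.length t rest hpw hsound hclosed
      rw [hval, outVal, hr, ← hl]
    apply ih
    · exact (List.pairwise_cons.mp hpw).2
    · exact fun j hj => hsound j (List.mem_cons_of_mem _ hj)
    · intro j hj k hk hal
      have hjt : t > j := (List.pairwise_cons.mp hpw).1 j hj
      have := hclosed j (List.mem_cons_of_mem _ hj) k hk hal
      rcases List.mem_cons.mp this with h | h
      · omega
      · exact h
    · rw [List.length_set]; exact hlen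
    · intro i hi hinot
      by_cases hit : i = t
      · subst hit
        rw [List.getD_eq_getElem?_getD, List.getElem?_set_self (by omega), hvo]
        rfl
      · rw [List.getD_eq_getElem?_getD, List.getElem?_set_ne (fun h => hit h.symm),
          ← List.getD_eq_getElem?_getD]
        exact hres i hi (by simp [hit, hinot])

def InvMain (A : List Int) (r : Bool) (m : Nat) (st : List Nat) (res : List Int) : Prop :=
  res.length = A.length ∧ st.Pairwise (· > ·) ∧
  (∀ j, j ∈ st ↔ (j < m ∧ aliveAt A r m j)) ∧
  (∀ i, i < m → ¬ aliveAt A r m i → res.getD i 0 = outVal A r i)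

theorem fold_inv (A : List Int) (r : Bool) : ∀ m, m ≤ A.length →
    InvMain A r m ((List.range m).foldl
      (fun (sr : List Nat × List Int) (idx : Nat) =>
        let q := popLoopP A r idx sr.1 sr.2
        (idx :: q.1, q.2)) ([], A.map (fun _ => 0))).1
      ((List.range m).foldl
      (fun (sr : List Nat × List Int) (idx : Nat) =>
        let q := popLoopP A r idx sr.1 sr.2
        (idx :: q.1, q.2)) ([], A.map (fun _ => 0))).2 := by
  intro m
  induction m with
  | zero =>
    intro _
    refine ⟨by simp, List.Pairwise.nil, by simp, fun i hi => absurd hi (by omega)⟩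
  | succ m ih =>
    intro hm1
    have hm : m < A.length := by omega
    obtain ⟨hlen, hpw, hmem, hres⟩ := ih (by omega)
    rw [List.range_succ, List.foldl_append, List.foldl_cons, List.foldl_nil]
    set st := ((List.range m).foldl
      (fun (sr : List Nat × List Int) (idx : Nat) =>
        let q := popLoopP A r idx sr.1 sr.2
        (idx :: q.1, q.2)) ([], A.map (fun _ => 0))).1 with hst
    set res := ((List.range m).foldl
      (fun (sr : List Nat × List Int) (idx : Nat) =>
        let q := popLoopP A r idx sr.1 sr.2
        (idx :: q.1, q.2)) ([], A.map (fun _ => 0))).2 with hrs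
    have hsound : ∀ j ∈ st, j < m ∧ aliveAt A r m j := fun j hj => (hmem j).mp hj
    have hclosed : ∀ j ∈ st, ∀ k, k < j → aliveAt A r m k → k ∈ st := by
      intro j hj k hk hal
      have hjm := ((hmem j).mp hj).1
      exact (hmem k).mpr ⟨by omega, hal⟩
    have hres0 : InvRes A r m st res := by
      intro i hi hinot _
      exact hres i hi (fun hal => hinot ((hmem i).mpr ⟨hi, hal⟩))
    obtain ⟨c1, c2, c3, c4, c5, c6⟩ := popLoop_ok A r m hm st res hpw hsound hclosed hlen hres0
    refine ⟨c5, ?_, ?_, ?_⟩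
    · exact List.pairwise_cons.mpr ⟨fun j hj => (c2 j hj).1, c1⟩
    · intro j
      constructor
      · intro hj
        rcases List.mem_cons.mp hj with h | h
        · subst h
          exact ⟨by omega, fun k hk1 hk2 => absurd hk1 (by omega)⟩
        · obtain ⟨hjm, hja, hjb⟩ := c2 j h
          refine ⟨by omega, fun k hk1 hk2 => ?_⟩
          by_cases hkm : k = m
          · subst hkm; exact hjb
          · exact hja k hk1 (by omega)
      · rintro ⟨hjm1, hja⟩
        by_cases hjm : j = m
        · subst hjm; exact List.mem_cons_self ..
        · have hjm' : j < m := by omega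
          have hjal : aliveAt A r m j := fun k hk1 hk2 => hja k hk1 (by omega)
          have hjb : beats A r m j = false := hja m hjm' (by omega)
          exact List.mem_cons_of_mem _ (c3 j ((hmem j).mpr ⟨hjm', hjal⟩) hjb)
    · intro i hi hnal
      by_cases him : i = m
      · subst him
        exact absurd (fun k hk1 hk2 => absurd hk1 (by omega)) hnal
      · have hi' : i < m := by omega
        have hinot : i ∉ (popLoopP A r m st res).1 := by
          intro hmem'
          obtain ⟨_, hja, hjb⟩ := c2 i hmem'
          apply hnal
          intro k hk1 hk2
          by_cases hkm : k = m
          · subst hkm; exact hjb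
          · exact hja k hk1 (by omega)
        exact c6 i hi' hinot hnal

-- ===== VERDICT (by name: the statement is the Claim_ definition above) =====
theorem get_count_both_spec : Claim_equal_get_count_both := by
  intro A r _
  unfold Spec_get_count_both
  obtain ⟨hlen, hpw, hmem, hres⟩ := fold_inv A r A.length le_rfl
  have hd := drain_ok A r _ _ hpw (fun j hj => (hmem j).mp hj)
    (fun j hj k hk hal => (hmem k).mpr ⟨by have := ((hmem j).mp hj).1; omega, hal⟩)
    hlen
    (fun i hi hin => hres i hi (fun hal => hin ((hmem i).mpr ⟨hi, hal⟩)))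
  have hgc : get_count_both A r = drainP A
      ((List.range A.length).foldl
        (fun (sr : List Nat × List Int) (idx : Nat) =>
          let q := popLoopP A r idx sr.1 sr.2
          (idx :: q.1, q.2)) ([], A.map (fun _ => 0))).1
      ((List.range A.length).foldl
        (fun (sr : List Nat × List Int) (idx : Nat) =>
          let q := popLoopP A r idx sr.1 sr.2
          (idx :: q.1, q.2)) ([], A.map (fun _ => 0))).2 := rfl
  rw [hgc]
  refine List.ext_getElem (by rw [hd.1]; simp [get_count_both_alt]) ?_
  intro i h1 h2
  have hi : i < A.length := by rw [← hd.1]; exact h1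
  calc _ = _ := (List.getD_eq_getElem _ 0 h1).symm
    _ = outVal A r i := hd.2 i hi
    _ = (get_count_both_alt A r)[i] := by
        simp [get_count_both_alt, outVal]
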